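-- pv_equiv track=rewrite | github.com/DreamCats/online-interview | datas/spider_lc.py | transferContent
-- ===== SOURCE A (Python) =====
-- def transferContent(content):
--     if content is None:
--         return None
--     else:
--         stri = ""
--         for c in content:
--             if c == '"':
--                 stri += c.replace('"', '\\\"')
--             elif c == "'":
--                 stri += c.replace("'", "\\\'")
--             elif c == "\\":
--                 stri += "\\\\"
--             else:
--                 stri += str(c)
--     return stri
-- ===== SOURCE B (Python) =====
-- def transferContent(content):
--     if content is None:
--         return None
--     # Staged whole-string passes: escape backslashes first, then each quote kind.
--     return content.replace('\\', '\\\\').replace('"', '\\"').replace("'", "\\'")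
-- ===== Notes on version B (the rewrite author's own statement) =====
-- stated objective: idiomatic
-- what changed: Replaced the per-character loop with if/elif branching and repeated concatenation by three staged whole-string str.replace passes (backslash first, then each quote), each a single C-level substring replacement.
import Mathlib
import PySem

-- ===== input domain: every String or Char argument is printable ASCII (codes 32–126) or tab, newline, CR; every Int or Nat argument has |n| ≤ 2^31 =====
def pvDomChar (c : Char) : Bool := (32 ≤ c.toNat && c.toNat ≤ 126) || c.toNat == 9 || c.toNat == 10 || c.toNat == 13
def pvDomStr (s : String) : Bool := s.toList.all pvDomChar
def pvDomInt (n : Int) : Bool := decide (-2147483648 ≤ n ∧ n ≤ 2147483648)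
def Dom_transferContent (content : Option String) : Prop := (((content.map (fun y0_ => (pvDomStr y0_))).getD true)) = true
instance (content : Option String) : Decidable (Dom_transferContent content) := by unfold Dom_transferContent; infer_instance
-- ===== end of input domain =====

-- B replaces A's per-character loop (if/elif chain, repeated concatenation) by three staged
-- whole-string replace passes: backslashes first, then each quote kind (idiomatic str.replace chain).

-- ===== PORT A =====
-- A's loop body: append the escaped form of c to the accumulator (branches in A's order).
def tcStep (acc : List Char) (c : Char) : List Char :=
  if c = '"' then acc ++ ['\\', '"']
  else if c = '\'' then acc ++ ['\\', '\'']
  else if c = '\\' then acc ++ ['\\', '\\']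
  else acc ++ [c]

def transferContent (content : Option String) : Option String :=
  match content with
  | none => none
  | some s => some (String.ofList (s.toList.foldl tcStep []))

-- ===== PORT B =====
-- three staged str.replace passes, in Source B's order: backslash, double quote, single quote
def transferContent_alt (content : Option String) : Option String :=
  content.map (fun s =>
    PySem.Str.replace (PySem.Str.replace (PySem.Str.replace s "\\" "\\\\") "\"" "\\\"") "'" "\\'")

-- ===== PRECONDITION & SPEC =====
def Spec_transferContent (content : Option String) (out : Option String) : Prop := out = transferContent_alt content
instance (content : Option String) (out : Option String) : Decidable (Spec_transferContent content out) := by unfold Spec_transferContent; infer_instance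

-- ===== CLAIM (what is proved, stated in full; the proofs are below) =====
def Claim_equal_transferContent : Prop := ∀ (content : Option String), Dom_transferContent content → Spec_transferContent content (transferContent content)

-- ===== LEMMAS AND PROOFS =====

-- single-character substitution: what one replace pass with a 1-char pattern does per character
def tcSub (o : Char) (new : List Char) (c : Char) : List Char :=
  if c = o then new else [c]

-- A's escape of one character
def tcEsc (c : Char) : List Char :=
  if c = '"' then ['\\', '"']
  else if c = '\'' then ['\\', '\'']
  else if c = '\\' then ['\\', '\\']
  else [c]

theorem tcStep_eq (acc : List Char) (c : Char) : tcStep acc c = acc ++ tcEsc c := by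
  unfold tcStep tcEsc
  split_ifs <;> rfl

theorem tc_foldl (l : List Char) (acc : List Char) :
    l.foldl tcStep acc = acc ++ l.flatMap tcEsc := by
  induction l generalizing acc with
  | nil => simp
  | cons c t ih => simp [List.foldl, tcStep_eq, ih]

-- replace with a single-character pattern is a character-wise flatMap
theorem replace_go_single (o : Char) (new : List Char) (fuel : Nat) :
    ∀ (l acc : List Char), l.length ≤ fuel →
      PySem.Chars.replace.go [o] new fuel l acc = acc.reverse ++ l.flatMap (tcSub o new) := by
  induction fuel with
  | zero =>
    intro l acc h
    have : l = [] := List.eq_nil_of_length_eq_zero (Nat.le_zero.mp h)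
    subst this
    simp [PySem.Chars.replace.go]
  | succ n ih =>
    intro l acc h
    cases l with
    | nil => simp [PySem.Chars.replace.go]
    | cons c t =>
      rw [PySem.Chars.replace.go]
      by_cases hc : c = o
      · subst hc
        have hp : List.isPrefixOf [c] (c :: t) = true := by
          simp [List.isPrefixOf]
        rw [if_pos hp]
        have := ih t (new.reverse ++ acc) (by simpa using Nat.le_of_succ_le_succ h)
        simpa [tcSub, List.flatMap_cons] using this
      · have hp : List.isPrefixOf [o] (c :: t) = false := by
          simp [List.isPrefixOf, eq_comm (a := o)]
          exact hc
        rw [if_neg (by simp [hp])]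
        have := ih t (c :: acc) (by simpa using Nat.le_of_succ_le_succ h)
        simpa [tcSub, hc, Ne.symm hc, List.flatMap_cons] using this

theorem replace_single (o : Char) (new l : List Char) :
    PySem.Chars.replace l [o] new = l.flatMap (tcSub o new) := by
  rw [PySem.Chars.replace]
  simp [replace_go_single o new l.length l [] (le_refl _)]

-- the three staged single-character passes compose to A's per-character escape
theorem staged_eq_esc (l : List Char) :
    ((l.flatMap (tcSub '\\' ['\\', '\\'])).flatMap (tcSub '"' ['\\', '"'])).flatMap
        (tcSub '\'' ['\\', '\'']) = l.flatMap tcEsc := by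
  induction l with
  | nil => rfl
  | cons c t ih =>
    simp only [List.flatMap_cons, List.flatMap_append, ih]
    congr 1
    unfold tcSub tcEsc
    by_cases h1 : c = '"' <;> by_cases h2 : c = '\'' <;> by_cases h3 : c = '\\' <;>
      simp_all

-- ===== VERDICT (by name: the statement is the Claim_ definition above) =====
theorem transferContent_spec : Claim_equal_transferContent := by
  intro content _
  unfold Spec_transferContent transferContent transferContent_alt
  cases content with
  | none => rfl
  | some s =>
    simp only [Option.map_some, PySem.Str.replace, String.toList_ofList]
    have hb : ("\\" : String).toList = ['\\'] := rfl
    have hq : ("\"" : String).toList = ['"'] := rfl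
    have hs : ("'" : String).toList = ['\''] := rfl
    have hbb : ("\\\\" : String).toList = ['\\', '\\'] := rfl
    have hqq : ("\\\"" : String).toList = ['\\', '"'] := rfl
    have hss : ("\\'" : String).toList = ['\\', '\''] := rfl
    rw [tc_foldl, List.nil_append]
    simp only [hb, hq, hs, hbb, hqq, hss, replace_single]
    rw [staged_eq_esc]
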